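-- pv_equiv track=rewrite | github.com/teyter/bioinfo | rosalind/lib/minmax.py | bagmax_index
-- ===== SOURCE A (Python) =====
-- def bagmax_index(tli):
--     ret = []
--     currentMax = 0
--     for i in range(len(tli)):
--         index = tli[i][0]
--         score = tli[i][1]
--         item = tli[i][2]
--         allt = tli[i] # debug, sja nr og item
--         if score > currentMax:
--             currentMax = score
--             ret.clear()
--             ret.append(allt)
--         elif score == currentMax:
--             ret.append(allt)
--     return ret
-- ===== SOURCE B (Python) =====
-- def bagmax_index(tli):
--     if not tli:
--         return []
--     t = max(0, max(row[1] for row in tli))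
--     return [row for row in tli if row[1] == t]
-- ===== Notes on version B (the rewrite author's own statement) =====
-- stated objective: simpler
-- what changed: Replaces A's single interleaved scan that clears and rebuilds the result list with a two-pass compute-threshold-then-filter: the threshold is max(0, max score), reproducing A's 0-initialised running maximum, then one filter keeps the rows in input order.
import Mathlib
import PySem

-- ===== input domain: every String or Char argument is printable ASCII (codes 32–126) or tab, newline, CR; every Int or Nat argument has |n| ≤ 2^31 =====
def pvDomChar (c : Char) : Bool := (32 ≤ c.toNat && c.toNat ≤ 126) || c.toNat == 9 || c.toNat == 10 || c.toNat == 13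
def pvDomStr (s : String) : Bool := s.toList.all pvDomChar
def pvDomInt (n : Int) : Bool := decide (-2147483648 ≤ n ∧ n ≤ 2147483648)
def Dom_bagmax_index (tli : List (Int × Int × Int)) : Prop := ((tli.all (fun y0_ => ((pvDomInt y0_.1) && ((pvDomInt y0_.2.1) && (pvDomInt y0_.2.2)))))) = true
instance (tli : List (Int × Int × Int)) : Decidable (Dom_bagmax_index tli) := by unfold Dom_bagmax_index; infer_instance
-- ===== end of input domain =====

-- B replaces A's interleaved clear-and-append scan with a two-pass shape: compute the
-- threshold max(0, max score) first, then filter the rows with that score (objective: simpler).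


-- ===== PORT A =====
-- A's loop body: state is (ret, currentMax); branches in A's order
def bagmaxStep (st : List (Int × Int × Int) × Int) (allt : Int × Int × Int) :
    List (Int × Int × Int) × Int :=
  let score := allt.2.1
  if score > st.2 then ([allt], score)
  else if score == st.2 then (st.1 ++ [allt], st.2)
  else st

def bagmax_index (tli : List (Int × Int × Int)) : List (Int × Int × Int) :=
  (tli.foldl bagmaxStep ([], 0)).1

-- ===== PORT B =====
def bagmax_index_alt (tli : List (Int × Int × Int)) : List (Int × Int × Int) :=
  if tli = [] then []
  else
    let t := max 0 (((tli.map (fun r => r.2.1)).max?).getD 0)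
    tli.filter (fun r => r.2.1 == t)

-- ===== PRECONDITION & SPEC =====
def Spec_bagmax_index (tli : List (Int × Int × Int)) (out : List (Int × Int × Int)) : Prop := out = bagmax_index_alt tli
instance (tli : List (Int × Int × Int)) (out : List (Int × Int × Int)) : Decidable (Spec_bagmax_index tli out) := by unfold Spec_bagmax_index; infer_instance

-- ===== CLAIM (what is proved, stated in full; the proofs are below) =====
def Claim_equal_bagmax_index : Prop := ∀ (tli : List (Int × Int × Int)), Dom_bagmax_index tli → Spec_bagmax_index tli (bagmax_index tli)

-- ===== LEMMAS AND PROOFS =====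

theorem foldl_max_shift (l : List Int) (a b : Int) :
    List.foldl max (max a b) l = max a (List.foldl max b l) := by
  induction l generalizing b with
  | nil => simp
  | cons c l ih => simpa [max_assoc] using ih (max b c)

theorem le_foldl_max (l : List Int) (a : Int) : a ≤ List.foldl max a l := by
  have h := foldl_max_shift l a a
  simp only [max_self] at h
  rw [h]
  exact le_max_left _ _

-- invariant of A's loop: the final currentMax is the running max over the state's currentMax,
-- and the final ret is (cleared iff a strictly larger score appears) ++ rows scoring that max
theorem bagmax_loop (l : List (Int × Int × Int)) (ret : List (Int × Int × Int)) (cm : Int) :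
    List.foldl bagmaxStep (ret, cm) l =
      ((if cm < List.foldl max cm (l.map (fun r => r.2.1)) then [] else ret) ++
        l.filter (fun r => r.2.1 == List.foldl max cm (l.map (fun r => r.2.1))),
       List.foldl max cm (l.map (fun r => r.2.1))) := by
  induction l generalizing ret cm with
  | nil => simp
  | cons t l ih =>
    simp only [List.foldl_cons, List.map_cons, bagmaxStep]
    by_cases h1 : t.2.1 > cm
    · have hmax : max cm t.2.1 = t.2.1 := max_eq_right (le_of_lt h1)
      simp only [if_pos h1, hmax, ih]
      have hle : t.2.1 ≤ List.foldl max t.2.1 (l.map (fun r => r.2.1)) := le_foldl_max _ _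
      set M := List.foldl max t.2.1 (l.map (fun r => r.2.1)) with hMdef
      have hcmM : cm < M := lt_of_lt_of_le h1 hle
      simp only [if_pos hcmM, List.filter_cons]
      by_cases h2 : t.2.1 = M
      · simp [h2]
      · have hlt : t.2.1 < M := lt_of_le_of_ne hle h2
        simp [if_pos hlt, h2]
    · have hnot : ¬ cm < t.2.1 := h1
      have hmax : max cm t.2.1 = cm := max_eq_left (not_lt.mp hnot)
      by_cases h2 : t.2.1 == cm
      · simp only [if_neg h1, if_pos h2, hmax, ih]
        have hle : cm ≤ List.foldl max cm (l.map (fun r => r.2.1)) := le_foldl_max _ _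
        set M := List.foldl max cm (l.map (fun r => r.2.1)) with hMdef
        have htcm : t.2.1 = cm := by simpa using h2
        simp only [List.filter_cons]
        by_cases h3 : cm < M
        · have : (t.2.1 == M) = false := by simp [htcm, ne_of_lt h3]
          simp [this, if_pos h3]
        · have hEq : cm = M := le_antisymm hle (not_lt.mp h3)
          have : (t.2.1 == M) = true := by simp [htcm, hEq]
          simp [this, if_neg h3]
      · simp only [if_neg h1, if_neg h2, hmax, ih]
        have hle : cm ≤ List.foldl max cm (l.map (fun r => r.2.1)) := le_foldl_max _ _
        set M := List.foldl max cm (l.map (fun r => r.2.1)) with hMdef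
        have hlt : t.2.1 < cm := lt_of_le_of_ne (not_lt.mp hnot) (by simpa using h2)
        have : (t.2.1 == M) = false := by simp [ne_of_lt (lt_of_lt_of_le hlt hle)]
        simp [this]

-- ===== VERDICT (by name: the statement is the Claim_ definition above) =====
theorem bagmax_index_spec : Claim_equal_bagmax_index := by
  intro tli _
  unfold Spec_bagmax_index bagmax_index bagmax_index_alt
  cases tli with
  | nil => simp
  | cons t l =>
    rw [bagmax_loop]
    have hmax? : List.max? ((t :: l).map (fun r => r.2.1)) =
        some ((l.map (fun r => r.2.1)).foldl max t.2.1) := by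
      simp [List.max?]
    have hM : List.foldl max 0 ((t :: l).map (fun r => r.2.1)) =
        max 0 ((l.map (fun r => r.2.1)).foldl max t.2.1) := by
      simpa using foldl_max_shift (l.map (fun r => r.2.1)) 0 t.2.1
    simp only [hmax?, hM, Option.getD_some, if_neg (List.cons_ne_nil t l)]
    split <;> simp
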